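-- pv_equiv track=rewrite | github.com/ajmastra/DNA-processing-LAB6 | dna.py | codons_list
-- ===== SOURCE A (Python) =====
-- def codons_list(nucleotide):
--     codon_list = []
--     nucleotide = nucleotide.split("-")
--     nucleotide = "".join(nucleotide)
--     for i in range(0, len(nucleotide) - 2, 3):
--         var = nucleotide[i] + nucleotide[i + 1] + nucleotide[i + 2]
--         codon_list.insert(i, var)
--     return codon_list
-- ===== SOURCE B (Python) =====
-- def codons_list(nucleotide):
--     it = iter("".join(c for c in nucleotide if c != "-"))
--     return ["".join(t) for t in zip(it, it, it)]
-- ===== Notes on version B (the rewrite author's own statement) =====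
-- stated objective: idiomatic
-- what changed: B removes dashes by a single character filter instead of split/join, and groups codons by pulling three characters at a time from one iterator (zip(it, it, it)) instead of an index loop over range(0, len-2, 3) with list.insert.
import Mathlib
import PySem

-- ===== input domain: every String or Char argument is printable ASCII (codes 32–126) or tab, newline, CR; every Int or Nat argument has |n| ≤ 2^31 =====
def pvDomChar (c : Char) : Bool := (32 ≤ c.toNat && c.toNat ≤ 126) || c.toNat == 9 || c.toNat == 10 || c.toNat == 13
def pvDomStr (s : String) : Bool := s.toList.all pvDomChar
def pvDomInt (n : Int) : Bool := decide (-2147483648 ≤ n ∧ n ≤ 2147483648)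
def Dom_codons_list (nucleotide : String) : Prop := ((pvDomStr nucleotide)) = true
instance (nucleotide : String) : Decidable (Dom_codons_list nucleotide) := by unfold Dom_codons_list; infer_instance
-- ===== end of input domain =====

-- B removes dashes with a single character filter and groups codons three characters at a
-- time from one iterator, instead of A's split/join plus an index loop over range(0, len-2, 3)
-- with list.insert.

-- ===== PORT A =====
-- A: codon_list = []; nucleotide = "".join(nucleotide.split("-"));
--    for i in range(0, len(nucleotide) - 2, 3):
--        var = nucleotide[i] + nucleotide[i+1] + nucleotide[i+2]; codon_list.insert(i, var)
-- (pyGetD's default ' ' is a totality guard only: every index drawn from the range is in bounds)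
def codons_list (nucleotide : String) : List String :=
  let parts := (PySem.Str.split? nucleotide "-").getD []
  let nuc := PySem.Str.join "" parts
  let cs := nuc.toList
  (PySem.List.pyRange 0 (PySem.Str.len nuc - 2) 3).foldl
    (fun acc i =>
      let var := String.mk [PySem.List.pyGetD cs i ' ',
                            PySem.List.pyGetD cs (i + 1) ' ',
                            PySem.List.pyGetD cs (i + 2) ' ']
      PySem.List.insert acc i var) []

-- ===== PORT B =====
-- B's grouping: zip(it, it, it) pulls three characters at a time from one iterator,
-- discarding a trailing group of fewer than three
def pvChunk3 : List Char → List String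
  | a :: b :: c :: rest => String.mk [a, b, c] :: pvChunk3 rest
  | _ => []

-- B: it = iter("".join(c for c in nucleotide if c != "-")); ["".join(t) for t in zip(it, it, it)]
def codons_list_alt (nucleotide : String) : List String :=
  pvChunk3 (nucleotide.toList.filter (fun c => !(c == '-')))

-- ===== PRECONDITION & SPEC =====
def Spec_codons_list (nucleotide : String) (out : List String) : Prop := out = codons_list_alt nucleotide
instance (nucleotide : String) (out : List String) : Decidable (Spec_codons_list nucleotide out) := by unfold Spec_codons_list; infer_instance

-- ===== CLAIM (what is proved, stated in full; the proofs are below) =====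
def Claim_equal_codons_list : Prop := ∀ (nucleotide : String), Dom_codons_list nucleotide → Spec_codons_list nucleotide (codons_list nucleotide)

-- ===== LEMMAS AND PROOFS =====

-- "".join with the empty separator is flatten
theorem pv_join_nil_eq_flatten (L : List (List Char)) : PySem.Chars.join [] L = L.flatten := by
  induction L with
  | nil => simp [PySem.Chars.join, List.intercalate]
  | cons x xs ih => simp_all [PySem.Chars.join, List.intercalate]; cases xs <;> simp_all [List.intersperse]

-- the pieces produced by split("-") concatenate back to the dash-filtered string
theorem pv_splitOn_go_flatten (fuel : Nat) : ∀ (l cur : List Char) (acc : List (List Char)),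
    l.length < fuel →
    (PySem.Chars.splitOn.go ['-'] fuel l cur acc).flatten
      = acc.reverse.flatten ++ cur.reverse ++ l.filter (fun c => !(c == '-')) := by
  induction fuel with
  | zero => intro l cur acc h; omega
  | succ f ih =>
    intro l cur acc h
    match l with
    | [] => simp [PySem.Chars.splitOn.go]
    | c :: rest =>
      rw [PySem.Chars.splitOn.go]
      by_cases hc : c = '-'
      · subst hc
        simp only [List.isPrefixOf, beq_self_eq_true, Bool.true_and, if_pos]
        rw [ih _ _ _ (by simpa using Nat.lt_of_succ_lt_succ h)]
        simp
      · have : List.isPrefixOf ['-'] (c :: rest) = false := by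
          simp [List.isPrefixOf]; exact fun h' => absurd h'.symm hc
        rw [this]
        simp only [Bool.false_eq_true, if_false]
        rw [ih _ _ _ (by simpa using Nat.lt_of_succ_lt_succ h)]
        simp [hc]

theorem pv_splitOn_flatten (s : List Char) :
    (PySem.Chars.splitOn s ['-']).flatten = s.filter (fun c => !(c == '-')) := by
  rw [PySem.Chars.splitOn, pv_splitOn_go_flatten _ _ _ _ (by omega)]; simp

-- list.insert at an index past the end appends
theorem pv_insert_ge {α : Type} (xs : List α) (i : Int) (v : α) (h : (xs.length : Int) ≤ i) :
    PySem.List.insert xs i v = xs ++ [v] := by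
  have h0 : ¬ i < 0 := by omega
  simp only [PySem.List.insert, PySem.List.sliceIndices]
  norm_num [h0]
  rw [min_eq_right h]
  simp

-- A's insert loop only ever appends: every inserted index is at least the current length
theorem pv_foldl_insert_eq_map (g : Int → String) :
    ∀ (r : List Int) (a : List String),
    (∀ k (hk : k < r.length), (a.length + k : Int) ≤ r[k]) →
    r.foldl (fun acc i => PySem.List.insert acc i (g i)) a = a ++ r.map g := by
  intro r
  induction r with
  | nil => simp
  | cons i rest ih =>
    intro a h
    have h0 : (a.length : Int) ≤ i := by simpa using h 0 (by simp)
    simp only [List.foldl_cons, pv_insert_ge a i (g i) h0]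
    rw [ih]
    · simp
    · intro k hk
      have := h (k + 1) (by simpa using Nat.succ_lt_succ hk)
      simp only [List.length_append, List.length_cons] at this ⊢
      push_cast at this ⊢
      simpa [add_comm, add_left_comm] using this

-- reading triples at indices 3k, 3k+1, 3k+2 is the three-at-a-time recursion
theorem pv_map_range_chunk (d : Char) : ∀ (cs : List Char),
    (List.range (cs.length / 3)).map
      (fun k => String.mk [cs.getD (3 * k) d, cs.getD (3 * k + 1) d, cs.getD (3 * k + 2) d])
      = pvChunk3 cs := by
  intro cs
  induction cs using pvChunk3.induct with
  | case1 a b c rest ih =>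
    have hlen : (a :: b :: c :: rest).length / 3 = rest.length / 3 + 1 := by
      simp [List.length_cons]; omega
    rw [hlen, List.range_succ_eq_map, List.map_cons, List.map_map]
    rw [pvChunk3]
    congr 1
  | case2 cs h =>
    have h3 : cs.length < 3 := by
      match cs with
      | [] => simp
      | [a] => simp
      | [a, b] => simp
      | a :: b :: c :: rest => exact absurd rfl (h a b c rest)
    have : cs.length / 3 = 0 := by omega
    rw [this]
    match cs, h3 with
    | [], _ => rfl
    | [a], _ => rfl
    | [a, b], _ => rfl

theorem pv_main (s : String) : codons_list s = codons_list_alt s := by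
  simp only [codons_list, codons_list_alt]
  set F := s.toList.filter (fun c => !(c == '-')) with hF
  have hsplit : ((PySem.Str.split? s "-").getD []).map String.toList
      = PySem.Chars.splitOn s.toList ['-'] := by
    have h := PySem.Str.split?_map s "-"
    have hd : "-".toList = ['-'] := by decide
    rw [hd, PySem.Chars.split?] at h
    simp only [List.isEmpty_cons, Bool.false_eq_true, if_false] at h
    cases ho : PySem.Str.split? s "-" with
    | none => rw [ho] at h; simp at h
    | some L => rw [ho] at h; simpa using h
  have hnuc : (PySem.Str.join "" ((PySem.Str.split? s "-").getD [])).toList = F := by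
    rw [PySem.Str.toList_join, hsplit]
    show PySem.Chars.join [] _ = F
    rw [pv_join_nil_eq_flatten, pv_splitOn_flatten]
  have hlen : PySem.Str.len (PySem.Str.join "" ((PySem.Str.split? s "-").getD []))
      = (F.length : Int) := by rw [PySem.Str.len_eq, hnuc]
  rw [hnuc, hlen]
  set n := F.length with hn
  have hrange : PySem.List.pyRange 0 ((n : Int) - 2) 3
      = (List.range (n / 3)).map (fun k => ((3 * k : Nat) : Int)) := by
    rw [PySem.List.pyRange_of_pos 0 ((n : Int) - 2) (by norm_num)]
    have hm : (if (0:Int) < (n : Int) - 2 then (((n : Int) - 2 - 0 + 3 - 1) / 3).toNat else 0) = n / 3 := by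
      split_ifs with h
      · omega
      · omega
    rw [hm]
    apply List.map_congr_left
    intro k hk
    push_cast
    ring
  rw [hrange]
  rw [pv_foldl_insert_eq_map]
  · rw [List.nil_append, List.map_map]
    rw [← pv_map_range_chunk ' ' F]
    apply List.map_congr_left
    intro k hk
    simp only [Function.comp]
    rw [show ((3 * k : Nat) : Int) + 1 = ((3 * k + 1 : Nat) : Int) by push_cast; ring,
        show ((3 * k : Nat) : Int) + 2 = ((3 * k + 2 : Nat) : Int) by push_cast; ring]
    rw [PySem.List.pyGetD_natCast, PySem.List.pyGetD_natCast, PySem.List.pyGetD_natCast]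
  · intro k hk
    simp only [List.getElem_map, List.getElem_range, List.length_nil]
    push_cast
    omega

-- ===== VERDICT (by name: the statement is the Claim_ definition above) =====
theorem codons_list_spec : Claim_equal_codons_list := by
  intro s _
  exact pv_main s
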